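-- pv_equiv track=rewrite | github.com/lotanamit5/grum4llm | src/grums/experiments/orchestrator.py | _expand_sweep_overrides
-- ===== SOURCE A (Python) =====
-- from itertools import product
-- from typing import Any, Callable
--
-- def _expand_sweep_overrides(sweep_parameters: dict[str, list[Any]]) -> list[dict[str, Any]]:
--     if not sweep_parameters:
--         return [{}]
--
--     keys = list(sweep_parameters.keys())
--     value_lists = [sweep_parameters[k] for k in keys]
--     combos: list[dict[str, Any]] = []
--     for combo_values in product(*value_lists):
--         combos.append(dict(zip(keys, combo_values)))
--     return combos
-- ===== SOURCE B (Python) =====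
-- def _expand_sweep_overrides(sweep_parameters):
--     combos = [{}]
--     for key, values in sweep_parameters.items():
--         combos = [{**partial, key: value} for partial in combos for value in values]
--     return combos
-- ===== Notes on version B (the rewrite author's own statement) =====
-- stated objective: simpler
-- what changed: Replaces itertools.product over precomputed value lists plus dict(zip(...)) per combo with an incremental fold that starts from a single empty override and extends every partial override dict by one key per step, removing the keys/value_lists staging and the empty-dict guard.
import Mathlib
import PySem

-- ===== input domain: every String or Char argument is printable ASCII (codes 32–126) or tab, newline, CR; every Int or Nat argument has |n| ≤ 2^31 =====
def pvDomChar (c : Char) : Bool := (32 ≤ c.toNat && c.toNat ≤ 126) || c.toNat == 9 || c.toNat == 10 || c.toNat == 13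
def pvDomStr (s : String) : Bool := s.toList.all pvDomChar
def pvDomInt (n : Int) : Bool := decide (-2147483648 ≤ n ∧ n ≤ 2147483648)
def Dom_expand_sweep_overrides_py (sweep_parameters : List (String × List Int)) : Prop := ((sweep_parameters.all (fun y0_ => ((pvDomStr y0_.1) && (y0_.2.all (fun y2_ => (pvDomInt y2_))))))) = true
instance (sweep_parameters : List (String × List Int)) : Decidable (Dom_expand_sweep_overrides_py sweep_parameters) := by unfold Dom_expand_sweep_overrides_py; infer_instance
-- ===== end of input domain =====

-- B replaces itertools.product + dict(zip(...)) with an incremental fold extending partial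
-- override dicts one key at a time; objective: simpler (no keys/value_lists staging, no guard).

-- ===== PORT A =====
-- itertools.product(*value_lists), transliterated structurally
def pvProdLists : List (List Int) → List (List Int)
  | [] => [[]]
  | vs :: rest => vs.flatMap (fun v => (pvProdLists rest).map (fun c => v :: c))

def expand_sweep_overrides_py (sweep_parameters : List (String × List Int)) : List (List (String × Int)) :=
  -- the dict parameter: insertion-ordered, duplicate keys overwritten in place
  let d := PySem.Dict.ofList sweep_parameters
  if d.items.isEmpty then [[]]
  else
    let keys := d.keys
    let value_lists := keys.map (fun k => d.getD k [])
    (pvProdLists value_lists).map (fun combo => (PySem.Dict.ofList (keys.zip combo)).items)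

-- ===== PORT B =====
def expand_sweep_overrides_py_alt (sweep_parameters : List (String × List Int)) : List (List (String × Int)) :=
  (PySem.Dict.ofList sweep_parameters).items.foldl
    (fun combos kv =>
      combos.flatMap (fun part => kv.2.map (fun v => ((PySem.Dict.mk part).insert kv.1 v).items)))
    [[]]

-- ===== PRECONDITION & SPEC =====
def Spec_expand_sweep_overrides_py (sweep_parameters : List (String × List Int)) (out : List (List (String × Int))) : Prop := out = expand_sweep_overrides_py_alt sweep_parameters
instance (sweep_parameters : List (String × List Int)) (out : List (List (String × Int))) : Decidable (Spec_expand_sweep_overrides_py sweep_parameters out) := by unfold Spec_expand_sweep_overrides_py; infer_instance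

-- ===== CLAIM (what is proved, stated in full; the proofs are below) =====
def Claim_equal_expand_sweep_overrides_py : Prop := ∀ (sweep_parameters : List (String × List Int)), Dom_expand_sweep_overrides_py sweep_parameters → Spec_expand_sweep_overrides_py sweep_parameters (expand_sweep_overrides_py sweep_parameters)

-- ===== LEMMAS AND PROOFS =====

-- the common recursive cartesian expansion both ports are proved equal to
def pvExpand : List (String × List Int) → List (List (String × Int))
  | [] => [[]]
  | (k, vs) :: rest => vs.flatMap (fun v => (pvExpand rest).map (fun c => (k, v) :: c))

theorem pvProdLists_length {c : List Int} {vls : List (List Int)}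
    (h : c ∈ pvProdLists vls) : c.length = vls.length := by
  induction vls generalizing c with
  | nil => simp [pvProdLists] at h; simp [h]
  | cons vs rest ih =>
    simp only [pvProdLists, List.mem_flatMap, List.mem_map] at h
    obtain ⟨v, _, c', hc', rfl⟩ := h
    simp [ih hc']

theorem ofList_items_of_nodup {P : List (String × Int)}
    (h : (P.map (·.1)).Nodup) : (PySem.Dict.ofList P).items = P := by
  have h2 := PySem.Dict.items_foldl_insert_fresh P (·.1) (·.2) PySem.Dict.empty
    (by intro a _; simp) h
  simpa [PySem.Dict.ofList, PySem.Dict.update] using h2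

theorem aside_eq_expand (L : List (String × List Int))
    (h : (L.map (·.1)).Nodup) :
    (pvProdLists (L.map (·.2))).map
      (fun combo => (PySem.Dict.ofList ((L.map (·.1)).zip combo)).items) = pvExpand L := by
  induction L with
  | nil =>
    simp only [List.map_nil, pvProdLists, pvExpand, List.map_cons, List.zip_nil_left]
    rfl
  | cons p rest ih =>
    obtain ⟨k, vs⟩ := p
    simp only [List.map_cons] at h ⊢
    have hk : k ∉ rest.map (·.1) := (List.nodup_cons.mp h).1
    have hnd : (rest.map (·.1)).Nodup := (List.nodup_cons.mp h).2
    have hlen : ∀ c ∈ pvProdLists (rest.map (·.2)), c.length = (rest.map (·.1)).length := by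
      intro c hc
      rw [pvProdLists_length hc]; simp
    have hzip : ∀ c ∈ pvProdLists (rest.map (·.2)),
        ((rest.map (·.1)).zip c).map (·.1) = rest.map (·.1) := by
      intro c hc
      exact List.map_fst_zip (le_of_eq (hlen c hc).symm)
    simp only [pvProdLists, pvExpand, List.map_flatMap, List.map_map]
    refine List.flatMap_congr ?_
    intro v _
    have step1 : ∀ c ∈ pvProdLists (rest.map (·.2)),
        (PySem.Dict.ofList (((k :: rest.map (·.1)).zip (v :: c)))).items
          = (k, v) :: (rest.map (·.1)).zip c := by
      intro c hc
      rw [List.zip_cons_cons]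
      refine ofList_items_of_nodup ?_
      rw [List.map_cons, hzip c hc]
      exact h
    calc (pvProdLists (rest.map (·.2))).map
            (fun c => (PySem.Dict.ofList ((k :: rest.map (·.1)).zip (v :: c))).items)
        = (pvProdLists (rest.map (·.2))).map
            (fun c => (k, v) :: (rest.map (·.1)).zip c) := by
          exact List.map_congr_left step1
      _ = (pvProdLists (rest.map (·.2))).map
            (fun c => (k, v) :: (PySem.Dict.ofList ((rest.map (·.1)).zip c)).items) := by
          refine List.map_congr_left ?_
          intro c hc
          rw [ofList_items_of_nodup (by rw [hzip c hc]; exact hnd)]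
      _ = (pvExpand rest).map (fun c => (k, v) :: c) := by
          rw [← ih hnd, List.map_map]; rfl

theorem bside_foldl (L : List (String × List Int)) (acc : List (List (String × Int)))
    (hL : (L.map (·.1)).Nodup)
    (hacc : ∀ part ∈ acc, ∀ kv ∈ L, kv.1 ∉ part.map (·.1)) :
    L.foldl (fun combos kv =>
        combos.flatMap (fun part => kv.2.map (fun v => ((PySem.Dict.mk part).insert kv.1 v).items)))
      acc = acc.flatMap (fun p => (pvExpand L).map (fun c => p ++ c)) := by
  induction L generalizing acc with
  | nil => simp [pvExpand]
  | cons p rest ih =>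
    obtain ⟨k, vs⟩ := p
    simp only [List.map_cons] at hL
    have hk : k ∉ rest.map (·.1) := (List.nodup_cons.mp hL).1
    have hnd : (rest.map (·.1)).Nodup := (List.nodup_cons.mp hL).2
    rw [List.foldl_cons]
    have hstep : acc.flatMap (fun part => vs.map (fun v => ((PySem.Dict.mk part).insert k v).items))
        = acc.flatMap (fun part => vs.map (fun v => part ++ [(k, v)])) := by
      refine List.flatMap_congr ?_
      intro part hpart
      refine List.map_congr_left ?_
      intro v _
      have hc : (PySem.Dict.mk part).contains k = false := by
        have hknot : k ∉ part.map (·.1) := hacc part hpart (k, vs) (by simp)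
        simp only [PySem.Dict.contains, List.any_eq_false]
        intro q hq hqk
        have hq1 : q.1 ∈ part.map (·.1) := List.mem_map_of_mem (f := (·.1)) hq
        rw [eq_of_beq hqk] at hq1
        exact hknot hq1
      exact PySem.Dict.items_insert_of_not_contains _ _ hc
    rw [hstep]
    have hacc' : ∀ part ∈ acc.flatMap (fun part => vs.map (fun v => part ++ [(k, v)])),
        ∀ kv ∈ rest, kv.1 ∉ part.map (·.1) := by
      intro part hpart kv hkv
      simp only [List.mem_flatMap, List.mem_map] at hpart
      obtain ⟨p0, hp0, v, _, rfl⟩ := hpart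
      simp only [List.map_append, List.map_cons, List.map_nil, List.mem_append,
        List.mem_singleton]
      rintro (hmem | hmem)
      · exact hacc p0 hp0 kv (by simp [hkv]) hmem
      · exact hk (hmem ▸ List.mem_map_of_mem hkv)
    rw [ih _ hnd hacc']
    simp only [pvExpand, List.flatMap_assoc, List.flatMap_map, List.map_flatMap, List.map_map]
    refine List.flatMap_congr ?_
    intro part _
    simp [Function.comp_def, List.append_assoc]

-- ===== VERDICT (by name: the statement is the Claim_ definition above) =====
theorem expand_sweep_overrides_py_spec : Claim_equal_expand_sweep_overrides_py := by
  intro sp _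
  unfold Spec_expand_sweep_overrides_py expand_sweep_overrides_py expand_sweep_overrides_py_alt
  set d := PySem.Dict.ofList sp with hd
  have hnd : d.keys.Nodup := PySem.Dict.nodup_keys_ofList sp
  have hB : d.items.foldl
      (fun combos kv => combos.flatMap (fun part => kv.2.map (fun v => ((PySem.Dict.mk part).insert kv.1 v).items)))
      [[]] = pvExpand d.items := by
    rw [bside_foldl d.items [[]] hnd (by intro part hpart; simp at hpart; simp [hpart])]
    simp
  by_cases hE : d.items.isEmpty
  · rw [if_pos hE, hB]
    rw [List.isEmpty_iff] at hE
    simp [hE, pvExpand]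
  · rw [if_neg hE, hB]
    have hvals : d.keys.map (fun k => d.getD k []) = d.items.map (·.2) := by
      show (d.items.map (·.1)).map (fun k => d.getD k []) = d.items.map (·.2)
      rw [List.map_map]
      refine List.map_congr_left ?_
      intro p hp
      exact PySem.Dict.getD_of_mem_items d (by simpa using hp) hnd []
    show (pvProdLists (d.keys.map (fun k => d.getD k []))).map
        (fun combo => (PySem.Dict.ofList (d.keys.zip combo)).items) = pvExpand d.items
    rw [show d.keys.map (fun k => d.getD k []) = d.items.map (·.2) from hvals]
    exact aside_eq_expand d.items hnd
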